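-- pv_equiv track=rewrite | github.com/srihariprasad-r/workable-code | Practice problems/foundation/recursion/staircasepath.py | staircasepath
-- ===== SOURCE A (Python) =====
-- def staircasepath(n):
--     # assumption is 3 steps can be taken [1,2,3] to reach destination
--     if n == 0:
--         return [""]
--     elif n < 0:
--         return []
--
--     p1 = staircasepath(n-1) # this is for 1 step towards reach destination
--     p2 = staircasepath(n-2) # this is for 2 steps towards reach destination
--     p3 = staircasepath(n-3) # this is for 3 steps towards reach destination
--
--     p = []
--
--     for path in p1:
--         p.append('1' + path)
--     for path in p2:
--         p.append('2' + path)
--     for path in p3: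
--         p.append('3' + path)
--
--     return p
-- ===== SOURCE B (Python) =====
-- def staircasepath(n):
--     # Bottom-up DP keeping only the last three path lists (a = paths for k, b = k-1, c = k-2)
--     if n < 0:
--         return []
--     a, b, c = [""], [], []
--     for _ in range(n):
--         a, b, c = (['1' + p for p in a] + ['2' + p for p in b] + ['3' + p for p in c], a, b)
--     return a
-- ===== Notes on version B (the rewrite author's own statement) =====
-- stated objective: alternative
-- what changed: Replaces the triple-branching recursion that recomputes every overlapping subproblem with a bottom-up loop that keeps only the last three path lists, so each subproblem's path list is built exactly once.
import Mathlib
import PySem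

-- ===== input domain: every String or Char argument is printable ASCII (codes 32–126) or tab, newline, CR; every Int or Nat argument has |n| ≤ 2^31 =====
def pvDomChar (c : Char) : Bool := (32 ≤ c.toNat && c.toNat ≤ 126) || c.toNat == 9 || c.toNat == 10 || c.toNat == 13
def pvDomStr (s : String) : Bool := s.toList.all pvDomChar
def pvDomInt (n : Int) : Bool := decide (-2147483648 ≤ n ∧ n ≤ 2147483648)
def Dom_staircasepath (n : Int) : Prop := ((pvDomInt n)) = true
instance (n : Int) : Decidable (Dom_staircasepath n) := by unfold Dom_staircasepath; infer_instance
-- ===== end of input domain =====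

-- B replaces A's triple recursion (which recomputes overlapping subproblems) with a
-- bottom-up loop keeping only the last three path lists; alternative algorithm.

-- ===== PORT A =====
def staircasepath (n : Int) : List String :=
  if n = 0 then [""]
  else if n < 0 then []
  else
    let p1 := staircasepath (n - 1)
    let p2 := staircasepath (n - 2)
    let p3 := staircasepath (n - 3)
    (p1.map (fun path => "1" ++ path)) ++ (p2.map (fun path => "2" ++ path))
      ++ (p3.map (fun path => "3" ++ path))
termination_by n.toNat
decreasing_by all_goals omega

-- ===== PORT B =====
-- the loop 'for _ in range(n)' over the state triple (a, b, c)
def stairLoop : Nat → (List String × List String × List String)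
  | 0 => ([""], [], [])
  | k + 1 =>
    let s := stairLoop k
    (s.1.map (fun p => "1" ++ p) ++ s.2.1.map (fun p => "2" ++ p)
       ++ s.2.2.map (fun p => "3" ++ p), s.1, s.2.1)

def staircasepath_alt (n : Int) : List String :=
  if n < 0 then [] else (stairLoop n.toNat).1

-- ===== PRECONDITION & SPEC =====
-- Pre_ excludes the large inputs on which the Python A overflows CPython's default
-- recursion depth and raises RecursionError before returning.
def Pre_staircasepath (n : Int) : Prop := n ≤ 997
instance (n : Int) : Decidable (Pre_staircasepath n) := by unfold Pre_staircasepath; infer_instance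
def pvWitness_staircasepath : Int := (4)

def Spec_staircasepath (n : Int) (out : List String) : Prop := out = staircasepath_alt n
instance (n : Int) (out : List String) : Decidable (Spec_staircasepath n out) := by unfold Spec_staircasepath; infer_instance

-- ===== CLAIM (what is proved, stated in full; the proofs are below) =====
def Claim_equal_staircasepath : Prop := ∀ (n : Int), Dom_staircasepath n → Pre_staircasepath n → Spec_staircasepath n (staircasepath n)

-- ===== LEMMAS AND PROOFS =====
theorem staircasepath_neg (n : Int) (h : n < 0) : staircasepath n = [] := by
  rw [staircasepath]
  rw [if_neg (by omega), if_pos h]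

theorem stairLoop_inv (k : Nat) :
    stairLoop k = (staircasepath k, staircasepath ((k : Int) - 1), staircasepath ((k : Int) - 2)) := by
  induction k with
  | zero =>
    have a0 : staircasepath 0 = [""] := by rw [staircasepath]; simp
    have a1 : staircasepath (-1) = [] := staircasepath_neg _ (by omega)
    have a2 : staircasepath (-2) = [] := staircasepath_neg _ (by omega)
    simp [stairLoop, a0, a1, a2]
  | succ k ih =>
    have e : staircasepath ((k : Int) + 1) =
        (staircasepath ((k : Int))).map (fun p => "1" ++ p)
          ++ (staircasepath ((k : Int) - 1)).map (fun p => "2" ++ p)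
          ++ (staircasepath ((k : Int) - 2)).map (fun p => "3" ++ p) := by
      rw [staircasepath]
      rw [if_neg (by omega), if_neg (by omega)]
      rw [show (k : Int) + 1 - 1 = (k : Int) from by ring,
          show (k : Int) + 1 - 2 = (k : Int) - 1 from by ring,
          show (k : Int) + 1 - 3 = (k : Int) - 2 from by ring]
    simp only [stairLoop, ih]
    push_cast
    rw [e]
    simp only [Prod.mk.injEq]
    refine ⟨by simp, by congr 1; ring, by congr 1; ring⟩

-- ===== VERDICT (by name: the statement is the Claim_ definition above) =====
theorem staircasepath_spec : Claim_equal_staircasepath := by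
  intro n _ _
  unfold Spec_staircasepath staircasepath_alt
  by_cases h : n < 0
  · rw [if_pos h, staircasepath_neg n h]
  · rw [if_neg h, stairLoop_inv]
    simp only
    congr 1
    omega
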